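-- pv_equiv track=rewrite | github.com/amol179/DSA_Notes_Dump | Code_Force/1000/D1. Sage's Birthday (easy version)/D1. Sage's Birthday (easy version).py | maximize_cheap_spheres
-- ===== SOURCE A (Python) =====
-- def maximize_cheap_spheres(n, prices):
--     # Step 1: Sort the prices in ascending order
--     prices.sort()
--
--     # Step 2: Create a new array to reorder the prices
--     reordered = [0] * n
--
--     # Place the smaller half of prices into odd indices (1-based)
--     odd_indices = range(1, n, 2)
--     for i, idx in enumerate(odd_indices):
--         reordered[idx] = prices[i]
--
--     # Place the larger half of prices into even indices (1-based)
--     even_indices = range(0, n, 2)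
--     for i, idx in enumerate(even_indices):
--         reordered[idx] = prices[len(odd_indices) + i]
--
--     # Count the number of cheap spheres
--     cheap_count = 0
--     for i in range(1, n - 1):
--         if reordered[i] < reordered[i - 1] and reordered[i] < reordered[i + 1]:
--             cheap_count += 1
--
--     return cheap_count, reordered
-- ===== SOURCE B (Python) =====
-- def maximize_cheap_spheres(n, prices):
--     # One fused pass: sort, then a single loop over positions that both emits
--     # the reordered element (by index arithmetic on the sorted list) and counts
--     # the cheap spheres on the fly (for an odd interior position the left, even
--     # neighbour is the binding comparison, since the list is sorted).
--     prices.sort()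
--     h = n // 2
--     cheap = 0
--     reordered = []
--     for j in range(n):
--         if j % 2:
--             v = prices[j // 2]
--             if j + 1 < n and v < prices[h + j // 2]:
--                 cheap += 1
--         else:
--             v = prices[h + j // 2]
--         reordered.append(v)
--     return cheap, reordered
-- ===== Notes on version B (the rewrite author's own statement) =====
-- stated objective: simpler
-- what changed: A preallocates an array, fills it in two separate placement passes (small half to odd indices, large half to even indices) and then scans the result for local minima with both neighbours; B replaces the three staged passes by ONE fused loop over positions that appends each element directly via index arithmetic on the sorted list and counts cheap spheres on the fly with a single comparison prices[j//2] < prices[h+j//2] (the left neighbour is binding on a sorted split).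
import Mathlib
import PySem

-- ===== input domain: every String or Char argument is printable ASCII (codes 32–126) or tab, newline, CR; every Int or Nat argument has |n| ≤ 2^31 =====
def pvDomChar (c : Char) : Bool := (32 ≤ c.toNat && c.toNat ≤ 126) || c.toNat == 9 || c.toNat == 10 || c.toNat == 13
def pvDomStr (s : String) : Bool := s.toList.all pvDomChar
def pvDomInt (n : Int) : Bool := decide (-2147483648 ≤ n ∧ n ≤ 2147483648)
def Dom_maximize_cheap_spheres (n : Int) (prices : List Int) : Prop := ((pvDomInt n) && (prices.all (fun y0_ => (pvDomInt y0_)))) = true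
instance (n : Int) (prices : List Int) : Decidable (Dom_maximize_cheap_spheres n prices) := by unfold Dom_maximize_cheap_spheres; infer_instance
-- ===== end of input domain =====

-- B replaces A's three staged passes (two index-placement loops into a
-- preallocated array, then a local-minima scan) by one fused loop that emits
-- each position directly by index arithmetic and counts on the fly; simpler.
-- Both A and B sort `prices` in place; the equivalence is about the return value.
-- ===== PORT A =====
-- Port of A. pyGetD/pySetD are exact under Pre_ (all indices in range there).
def maximize_cheap_spheres (n : Int) (prices : List Int) : Int × List Int :=
  let ps := PySem.List.sorted prices (fun x => x) false
  let reordered0 : List Int := PySem.List.pyRepeat [(0 : Int)] n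
  let oddIdx := PySem.List.pyRange 1 n 2
  let r1 := (PySem.List.enumerate oddIdx).foldl
      (fun r p => PySem.List.pySetD r p.2 (PySem.List.pyGetD ps p.1 0)) reordered0
  let evenIdx := PySem.List.pyRange 0 n 2
  let r2 := (PySem.List.enumerate evenIdx).foldl
      (fun r p => PySem.List.pySetD r p.2 (PySem.List.pyGetD ps (PySem.List.len oddIdx + p.1) 0)) r1
  let cheap := (PySem.List.pyRange 1 (n - 1) 1).foldl
      (fun acc i => if PySem.List.pyGetD r2 i 0 < PySem.List.pyGetD r2 (i - 1) 0 ∧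
                       PySem.List.pyGetD r2 i 0 < PySem.List.pyGetD r2 (i + 1) 0
                    then acc + 1 else acc) 0
  (cheap, r2)

-- ===== PORT B =====
-- Port of B: one fused loop over positions; state = (cheap, reordered).
def maximize_cheap_spheres_alt (n : Int) (prices : List Int) : Int × List Int :=
  let ps := PySem.List.sorted prices (fun x => x) false
  let h := PySem.Int.floordiv n 2
  (PySem.List.pyRange 0 n 1).foldl
    (fun st j =>
      if PySem.Int.mod j 2 == 1 then
        let v := PySem.List.pyGetD ps (PySem.Int.floordiv j 2) 0
        ((if j + 1 < n ∧ v < PySem.List.pyGetD ps (h + PySem.Int.floordiv j 2) 0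
          then st.1 + 1 else st.1), st.2 ++ [v])
      else
        (st.1, st.2 ++ [PySem.List.pyGetD ps (h + PySem.Int.floordiv j 2) 0]))
    ((0 : Int), ([] : List Int))

-- ===== PRECONDITION & SPEC =====
-- Pre_: exactly the inputs where A returns normally; for n > len(prices) A
-- raises IndexError reading the sorted prices.
def Pre_maximize_cheap_spheres (n : Int) (prices : List Int) : Prop :=
  n ≤ (prices.length : Int)
instance (n : Int) (prices : List Int) : Decidable (Pre_maximize_cheap_spheres n prices) := by unfold Pre_maximize_cheap_spheres; infer_instance
def pvWitness_maximize_cheap_spheres : Int × List Int := (4, [3, 1, 4, 2])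

def Spec_maximize_cheap_spheres (n : Int) (prices : List Int) (out : Int × List Int) : Prop := out = maximize_cheap_spheres_alt n prices
instance (n : Int) (prices : List Int) (out : Int × List Int) : Decidable (Spec_maximize_cheap_spheres n prices out) := by unfold Spec_maximize_cheap_spheres; infer_instance

-- ===== CLAIM (what is proved, stated in full; the proofs are below) =====
def Claim_equal_maximize_cheap_spheres : Prop := ∀ (n : Int) (prices : List Int), Dom_maximize_cheap_spheres n prices → Pre_maximize_cheap_spheres n prices → Spec_maximize_cheap_spheres n prices (maximize_cheap_spheres n prices)

-- ===== LEMMAS AND PROOFS =====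

-- generic: fold of indexed writes
theorem pvFoldSet_length (g : Nat → Nat) (v : Nat → Int) (l : List Nat) (r0 : List Int) :
    (l.foldl (fun r k => r.set (g k) (v k)) r0).length = r0.length := by
  induction l generalizing r0 with
  | nil => rfl
  | cons a l ih => simp [List.foldl_cons, ih]

theorem pvFoldSet_miss (g : Nat → Nat) (v : Nat → Int) (l : List Nat) (r0 : List Int)
    (j : Nat) (hj : ∀ k ∈ l, g k ≠ j) :
    (l.foldl (fun r k => r.set (g k) (v k)) r0)[j]? = r0[j]? := by
  induction l generalizing r0 with
  | nil => rfl
  | cons a l ih =>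
      rw [List.foldl_cons, ih _ (fun k hk => hj k (List.mem_cons_of_mem _ hk)),
        List.getElem?_set_ne (hj a (List.mem_cons_self) )]

theorem pvFoldSet_hit (g : Nat → Nat) (v : Nat → Int) (l : List Nat) (r0 : List Int)
    (k0 : Nat) (hk : k0 ∈ l) (hnd : l.Nodup)
    (hinj : ∀ k ∈ l, g k = g k0 → k = k0) (hlen : g k0 < r0.length) :
    (l.foldl (fun r k => r.set (g k) (v k)) r0)[g k0]? = some (v k0) := by
  induction l generalizing r0 with
  | nil => cases hk
  | cons a l ih =>
      rw [List.foldl_cons]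
      rcases List.mem_cons.mp hk with rfl | hk'
      · have hnotin : k0 ∉ l := (List.nodup_cons.mp hnd).1
        rw [pvFoldSet_miss]
        · exact List.getElem?_set_self hlen
        · intro k hkl hgk
          exact hnotin (by rwa [hinj k (List.mem_cons_of_mem _ hkl) hgk] at hkl)
      · exact ih _ hk' (List.nodup_cons.mp hnd).2
          (fun k hkl => hinj k (List.mem_cons_of_mem _ hkl))
          (by simpa using hlen)

-- generic: fold building a list by appends while counting
theorem pvFoldCL (q : Nat → Bool) (f : Nat → Int) (l : List Nat) (c0 : Int) (r0 : List Int) :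
    l.foldl (fun st j => ((if q j then st.1 + 1 else st.1), st.2 ++ [f j])) (c0, r0)
      = (c0 + (l.countP q : Int), r0 ++ l.map f) := by
  induction l generalizing c0 r0 with
  | nil => simp
  | cons a l ih =>
      rw [List.foldl_cons]
      by_cases hq : q a
      · rw [if_pos hq, ih]
        simp [hq]
        ring
      · rw [if_neg hq, ih]
        simp [hq]

-- counting over even / odd positions only
theorem pvCount_even_half (p : Nat → Bool) (t : Nat) :
    (List.range t).countP (fun k => k % 2 == 0 && p (k / 2)) =
      (List.range ((t + 1) / 2)).countP p := by
  induction t with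
  | zero => rfl
  | succ t ih =>
      rw [List.range_succ, List.countP_append]
      rcases Nat.mod_two_eq_zero_or_one t with h2 | h2
      · have h1 : (t + 1 + 1) / 2 = (t + 1) / 2 + 1 := by omega
        have h3 : (t + 1) / 2 = t / 2 := by omega
        rw [h1, List.range_succ, List.countP_append, ← ih]
        simp [h2, h3]
      · have h1 : (t + 1 + 1) / 2 = (t + 1) / 2 := by omega
        rw [h1, ← ih]
        simp [h2]

theorem pvCount_odd_half (p : Nat → Bool) (t : Nat) :
    (List.range t).countP (fun k => k % 2 == 1 && p (k / 2)) =
      (List.range (t / 2)).countP p := by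
  induction t with
  | zero => rfl
  | succ t ih =>
      rw [List.range_succ, List.countP_append]
      rcases Nat.mod_two_eq_zero_or_one t with h2 | h2
      · have h1 : (t + 1) / 2 = t / 2 := by omega
        rw [h1, ← ih]
        simp [h2]
      · have h1 : (t + 1) / 2 = t / 2 + 1 := by omega
        rw [h1, List.range_succ, List.countP_append, ← ih]
        simp [h2]

theorem pvCount_guard (p : Nat → Bool) (a b : Nat) (hba : b ≤ a) :
    (List.range a).countP (fun t => decide (t < b) && p t) = (List.range b).countP p := by
  obtain ⟨c, rfl⟩ := Nat.exists_eq_add_of_le hba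
  rw [List.range_add, List.countP_append]
  have h1 : (List.range b).countP (fun t => decide (t < b) && p t) = (List.range b).countP p := by
    apply List.countP_congr
    intro t ht
    simp [List.mem_range.mp ht]
  have h2 : ((List.range c).map (b + ·)).countP (fun t => decide (t < b) && p t) = 0 := by
    rw [List.countP_eq_zero]
    intro t ht
    simp only [List.mem_map] at ht
    obtain ⟨i, -, rfl⟩ := ht
    simp
  rw [h1, h2]
  omega

-- normal forms of the two ports (proof-only helpers)
def pvR (ps : List Int) (M : Nat) : List Int :=
  (List.range (M - M / 2)).foldl (fun r k => r.set (2 * k) (ps.getD (M / 2 + k) 0))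
    ((List.range (M / 2)).foldl (fun r k => r.set (2 * k + 1) (ps.getD k 0))
      (List.replicate M (0 : Int)))

def pvCA (ps : List Int) (M : Nat) (k : Nat) : Bool :=
  decide ((pvR ps M).getD (k + 1) 0 < (pvR ps M).getD k 0 ∧
          (pvR ps M).getD (k + 1) 0 < (pvR ps M).getD (k + 2) 0)

def pvCB (ps : List Int) (M : Nat) (k : Nat) : Bool :=
  decide (ps.getD k 0 < ps.getD (M / 2 + k) 0)

def pvF (ps : List Int) (M : Nat) (j : Nat) : Int :=
  if j % 2 = 1 then ps.getD (j / 2) 0 else ps.getD (M / 2 + j / 2) 0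

def pvQ (ps : List Int) (M : Nat) (j : Nat) : Bool :=
  j % 2 == 1 && (decide (j + 1 < M) && pvCB ps M (j / 2))

theorem pvOddRange (M : Nat) : PySem.List.pyRange 1 (M : Int) 2 =
    List.map (fun (k : Nat) => (1 : Int) + 2 * (k : Int)) (List.range (M / 2)) := by
  rw [PySem.List.pyRange_of_pos _ _ (by norm_num : (0:Int) < 2)]
  have h : (if (1:Int) < (M:Int) then (((M:Int) - 1 + 2 - 1) / 2).toNat else 0) = M / 2 := by
    split_ifs <;> omega
  rw [h]

theorem pvEvenRange (M : Nat) : PySem.List.pyRange 0 (M : Int) 2 =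
    List.map (fun (k : Nat) => (0 : Int) + 2 * (k : Int)) (List.range (M - M / 2)) := by
  rw [PySem.List.pyRange_of_pos _ _ (by norm_num : (0:Int) < 2)]
  have h : (if (0:Int) < (M:Int) then (((M:Int) - 0 + 2 - 1) / 2).toNat else 0) = M - M / 2 := by
    split_ifs <;> omega
  rw [h]

theorem pvEnumMapRange (f : Nat → Int) (c : Nat) :
    PySem.List.enumerate (List.map f (List.range c)) =
      List.map (fun (k : Nat) => ((k : Int), f k)) (List.range c) := by
  rw [PySem.List.enumerate_eq_map_pyRange _ 0]
  have hlen : PySem.List.len (List.map f (List.range c)) = (c : Int) := by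
    simp [PySem.List.len_eq]
  rw [hlen, PySem.List.pyRange_zero_nat, List.map_map]
  apply List.map_congr_left
  intro k hk
  simp only [List.mem_range] at hk
  simp only [Function.comp, PySem.List.pyGetD_natCast, List.getD_eq_getElem?_getD,
    List.getElem?_map, List.getElem?_range hk, Option.map_some, Option.getD_some]

theorem pvA_eq (M : Nat) (prices : List Int) :
    maximize_cheap_spheres (M : Int) prices =
      (((List.range (M - 2)).countP
          (pvCA (PySem.List.sorted prices (fun x => x) false) M) : Int),
        pvR (PySem.List.sorted prices (fun x => x) false) M) := by
  set ps := PySem.List.sorted prices (fun x => x) false with hps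
  simp only [maximize_cheap_spheres]
  have hRep : PySem.List.pyRepeat [(0:Int)] (M : Int) = List.replicate M (0:Int) := by
    rw [PySem.List.pyRepeat_singleton]; simp
  have hLenOdd : PySem.List.len (List.map (fun (k : Nat) => (1 : Int) + 2 * (k : Int)) (List.range (M / 2)))
      = ((M / 2 : Nat) : Int) := by simp [PySem.List.len_eq]
  rw [pvOddRange, pvEvenRange, hRep, hLenOdd, pvEnumMapRange, pvEnumMapRange,
      List.foldl_map, List.foldl_map]
  have hstep1 : (fun (r : List Int) (k : Nat) =>
      PySem.List.pySetD r ((1 : Int) + 2 * (k : Int)) (PySem.List.pyGetD ps (k : Int) 0)) =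
      fun r k => r.set (2 * k + 1) (ps.getD k 0) := by
    funext r k
    have h1 : (1:Int) + 2*(k:Int) = ((2*k+1 : Nat):Int) := by push_cast; ring
    rw [h1, PySem.List.pySetD_natCast, PySem.List.pyGetD_natCast]
  have hstep2 : (fun (r : List Int) (k : Nat) =>
      PySem.List.pySetD r ((0 : Int) + 2 * (k : Int)) (PySem.List.pyGetD ps (((M / 2 : Nat) : Int) + (k : Int)) 0)) =
      fun r k => r.set (2 * k) (ps.getD (M / 2 + k) 0) := by
    funext r k
    have h1 : (0:Int) + 2*(k:Int) = ((2*k : Nat):Int) := by push_cast; ring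
    have h2 : ((M / 2 : Nat) : Int) + (k:Int) = ((M/2 + k : Nat):Int) := by push_cast; ring
    rw [h1, h2, PySem.List.pySetD_natCast, PySem.List.pyGetD_natCast]
  rw [hstep1, hstep2]
  have hRfold : (List.range (M - M / 2)).foldl (fun r k => r.set (2 * k) (ps.getD (M / 2 + k) 0))
      ((List.range (M / 2)).foldl (fun r k => r.set (2 * k + 1) (ps.getD k 0))
        (List.replicate M (0:Int))) = pvR ps M := rfl
  rw [hRfold]
  have hT : ((M : Int) - 1 - 1).toNat = M - 2 := by omega
  rw [PySem.List.pyRange_one, hT,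
      PySem.List.foldl_ite_add_one (p := fun i =>
        PySem.List.pyGetD (pvR ps M) i 0 < PySem.List.pyGetD (pvR ps M) (i - 1) 0 ∧
        PySem.List.pyGetD (pvR ps M) i 0 < PySem.List.pyGetD (pvR ps M) (i + 1) 0),
      List.countP_map, zero_add]
  refine congrArg (fun c : Nat => ((c : Int), pvR ps M)) ?_
  apply List.countP_congr
  intro k _
  simp only [Function.comp]
  have h1 : (1:Int) + (k:Int) = ((k+1 : Nat):Int) := by push_cast; ring
  have h2 : ((k+1 : Nat):Int) - 1 = ((k : Nat):Int) := by push_cast; ring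
  have h3 : ((k+1 : Nat):Int) + 1 = ((k+2 : Nat):Int) := by push_cast; ring
  simp only [h1, h2, h3, PySem.List.pyGetD_natCast, pvCA]

theorem pvB_eq (M : Nat) (prices : List Int) :
    maximize_cheap_spheres_alt (M : Int) prices =
      (((List.range M).countP (pvQ (PySem.List.sorted prices (fun x => x) false) M) : Int),
        (List.range M).map (pvF (PySem.List.sorted prices (fun x => x) false) M)) := by
  set ps := PySem.List.sorted prices (fun x => x) false with hps
  simp only [maximize_cheap_spheres_alt, ← hps]
  rw [PySem.List.pyRange_zero_nat, List.foldl_map]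
  refine Eq.trans (PySem.List.foldl_congr_mem _ _
    (fun (st : Int × List Int) (j : Nat) =>
      ((if pvQ ps M j then st.1 + 1 else st.1), st.2 ++ [pvF ps M j])) _ ?_) ?_
  · intro st j hj
    have hmod : PySem.Int.mod (j : Int) 2 = ((j % 2 : Nat) : Int) := by
      exact_mod_cast PySem.Int.mod_natCast j 2
    have hdivj : PySem.Int.floordiv (j : Int) 2 = ((j / 2 : Nat) : Int) := by
      exact_mod_cast PySem.Int.floordiv_natCast j 2
    have hdivM : PySem.Int.floordiv (M : Int) 2 = ((M / 2 : Nat) : Int) := by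
      exact_mod_cast PySem.Int.floordiv_natCast M 2
    have hadd : ((M / 2 : Nat) : Int) + ((j / 2 : Nat) : Int) = ((M / 2 + j / 2 : Nat) : Int) := by
      push_cast; ring
    simp only [hmod, hdivj, hdivM, hadd, PySem.List.pyGetD_natCast]
    have hmodeq : ((((j % 2 : Nat) : Int)) == 1) = (j % 2 == 1) := by
      rcases Nat.mod_two_eq_zero_or_one j with h | h <;> simp [h]
    have hlt : ((j : Int) + 1 < (M : Int)) ↔ (j + 1 < M) := by
      constructor <;> intro h <;> [exact_mod_cast h; exact_mod_cast h]
    rw [hmodeq]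
    by_cases hj2 : j % 2 = 1
    · have hb : (j % 2 == 1) = true := by simp [hj2]
      rw [if_pos hb]
      have hF : pvF ps M j = ps.getD (j / 2) 0 := by rw [pvF, if_pos hj2]
      have hQ : pvQ ps M j =
          (decide (j + 1 < M) && decide (ps.getD (j / 2) 0 < ps.getD (M / 2 + j / 2) 0)) := by
        simp [pvQ, pvCB, hb]
      rw [hF, hQ]
      by_cases hg : j + 1 < M
      · by_cases hc : ps.getD (j / 2) 0 < ps.getD (M / 2 + j / 2) 0
        · rw [if_pos ⟨hlt.mpr hg, hc⟩]; simp [hg, ← List.getD_eq_getElem?_getD, hc]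
        · rw [if_neg (by rintro ⟨-, h⟩; exact hc h)]; simp [← List.getD_eq_getElem?_getD, hc]
      · rw [if_neg (by rintro ⟨h, -⟩; exact hg (hlt.mp h))]; simp [hg]
    · have hb : (j % 2 == 1) = false := by simpa using hj2
      rw [if_neg (by simp [hb])]
      have hF : pvF ps M j = ps.getD (M / 2 + j / 2) 0 := by rw [pvF, if_neg hj2]
      have hQ : pvQ ps M j = false := by simp [pvQ, hb]
      rw [hF, hQ]
      simp
  · rw [pvFoldCL, zero_add, List.nil_append]

theorem pvR_length (ps : List Int) (M : Nat) : (pvR ps M).length = M := by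
  unfold pvR
  rw [pvFoldSet_length, pvFoldSet_length, List.length_replicate]

theorem pvR_odd (ps : List Int) (M : Nat) (j : Nat) (hj : j < M / 2) :
    (pvR ps M)[2 * j + 1]? = some (ps.getD j 0) := by
  unfold pvR
  rw [pvFoldSet_miss _ _ _ _ _ (by intro k _; show 2 * k ≠ 2 * j + 1; omega)]
  exact pvFoldSet_hit (fun k => 2 * k + 1) _ _ _ j (List.mem_range.mpr hj)
    List.nodup_range (fun k _ h => by simp only [] at h; omega)
    (by rw [List.length_replicate]; show 2 * j + 1 < M; omega)

theorem pvR_even (ps : List Int) (M : Nat) (j : Nat) (hj : j < M - M / 2) :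
    (pvR ps M)[2 * j]? = some (ps.getD (M / 2 + j) 0) := by
  unfold pvR
  exact pvFoldSet_hit (fun k => 2 * k) _ _ _ j (List.mem_range.mpr hj)
    List.nodup_range (fun k _ h => by simp only [] at h; omega)
    (by rw [pvFoldSet_length, List.length_replicate]; show 2 * j < M; omega)

theorem pvMap_eq (ps : List Int) (M : Nat) :
    (List.range M).map (pvF ps M) = pvR ps M := by
  apply List.ext_getElem?
  intro i
  by_cases hi : i < M
  · have hmapi : ((List.range M).map (pvF ps M))[i]? = some (pvF ps M i) := by
      rw [List.getElem?_map, List.getElem?_range hi, Option.map_some]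
    rw [hmapi]
    rcases Nat.mod_two_eq_zero_or_one i with h2 | h2
    · have hij : i = 2 * (i / 2) := by omega
      have hb : i / 2 < M - M / 2 := by omega
      rw [hij, pvR_even _ _ _ hb, ← hij, pvF, if_neg (by omega)]
    · have hij : i = 2 * (i / 2) + 1 := by omega
      have hb : i / 2 < M / 2 := by omega
      rw [hij, pvR_odd _ _ _ hb, ← hij, pvF, if_pos h2]
  · rw [List.getElem?_eq_none (by simpa using hi),
      List.getElem?_eq_none (by rw [pvR_length]; omega)]

theorem pvCountA_eq (ps : List Int) (M : Nat) (hlen : M ≤ ps.length)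
    (hmono : ∀ p q : Nat, p ≤ q → q < ps.length → ps.getD p 0 ≤ ps.getD q 0) :
    (List.range (M - 2)).countP (pvCA ps M) =
      (List.range ((M - 1) / 2)).countP (pvCB ps M) := by
  have hgetR : ∀ j : Nat, (pvR ps M).getD j 0 = (pvR ps M)[j]?.getD 0 :=
    fun j => List.getD_eq_getElem?_getD
  have hstep : ∀ k ∈ List.range (M - 2),
      pvCA ps M k = ((k % 2 == 0) && pvCB ps M (k / 2)) := by
    intro k hk
    rw [List.mem_range] at hk
    rcases Nat.mod_two_eq_zero_or_one k with hk2 | hk2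
    · have hj1 : k + 1 = 2 * (k / 2) + 1 := by omega
      have hj0 : k = 2 * (k / 2) := by omega
      have hj2 : k + 2 = 2 * (k / 2 + 1) := by omega
      have hb1 : k / 2 < M / 2 := by omega
      have hb0 : k / 2 < M - M / 2 := by omega
      have hb2 : k / 2 + 1 < M - M / 2 := by omega
      have hRk : (pvR ps M)[k]? = some (ps.getD (M / 2 + k / 2) 0) := by
        have h := pvR_even ps M (k / 2) hb0
        rwa [← hj0] at h
      rw [pvCA, hgetR (k+1), hgetR k, hgetR (k+2)]
      rw [hj1, pvR_odd _ _ _ hb1, hRk, hj2, pvR_even _ _ _ hb2]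
      simp only [Option.getD_some, pvCB, hk2, beq_self_eq_true, Bool.true_and]
      have himp : ps.getD (k / 2) 0 < ps.getD (M / 2 + k / 2) 0 →
          ps.getD (k / 2) 0 < ps.getD (M / 2 + (k / 2 + 1)) 0 := by
        intro h
        exact lt_of_lt_of_le h (hmono _ _ (by omega) (by omega))
      have : (ps.getD (k / 2) 0 < ps.getD (M / 2 + k / 2) 0 ∧
          ps.getD (k / 2) 0 < ps.getD (M / 2 + (k / 2 + 1)) 0) ↔
          ps.getD (k / 2) 0 < ps.getD (M / 2 + k / 2) 0 :=
        ⟨fun h => h.1, fun h => ⟨h, himp h⟩⟩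
      rw [decide_eq_decide.mpr this]
    · have hj1 : k + 1 = 2 * (k / 2 + 1) := by omega
      have hj0 : k = 2 * (k / 2) + 1 := by omega
      have hb1 : k / 2 + 1 < M - M / 2 := by omega
      have hb0 : k / 2 < M / 2 := by omega
      have hRk : (pvR ps M)[k]? = some (ps.getD (k / 2) 0) := by
        have h := pvR_odd ps M (k / 2) hb0
        rwa [← hj0] at h
      rw [pvCA, hgetR (k+1), hgetR k, hj1, pvR_even _ _ _ hb1, hRk]
      simp only [Option.getD_some, hk2]
      have hle := hmono (k / 2) (M / 2 + (k / 2 + 1)) (by omega) (by omega)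
      simp
      intro h
      exfalso
      rw [← List.getD_eq_getElem?_getD, ← List.getD_eq_getElem?_getD] at h
      omega
  rw [List.countP_congr (fun k hk => by rw [hstep k hk])]
  have h2 : (M - 2 + 1) / 2 = (M - 1) / 2 := by omega
  rw [pvCount_even_half (pvCB ps M) (M - 2), h2]

theorem pvCountB_eq (ps : List Int) (M : Nat) :
    (List.range M).countP (pvQ ps M) =
      (List.range ((M - 1) / 2)).countP (pvCB ps M) := by
  have hcong : ∀ j ∈ List.range M,
      pvQ ps M j = ((j % 2 == 1) &&
        (decide (j / 2 < (M - 1) / 2) && pvCB ps M (j / 2))) := by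
    intro j _
    rcases Nat.mod_two_eq_zero_or_one j with h2 | h2
    · simp [pvQ, h2]
    · have : (j + 1 < M) ↔ (j / 2 < (M - 1) / 2) := by omega
      simp only [pvQ, h2, beq_self_eq_true, Bool.true_and]
      rw [decide_eq_decide.mpr this]
  rw [List.countP_congr (fun j hj => by rw [hcong j hj]),
      pvCount_odd_half (fun t => decide (t < (M - 1) / 2) && pvCB ps M t) M,
      pvCount_guard (pvCB ps M) (M / 2) ((M - 1) / 2) (by omega)]

theorem pvMain (n : Int) (prices : List Int) (hpre : n ≤ (prices.length : Int)) :
    maximize_cheap_spheres n prices = maximize_cheap_spheres_alt n prices := by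
  by_cases hn : 0 ≤ n
  · obtain ⟨M, rfl⟩ : ∃ M : Nat, n = (M : Int) := ⟨n.toNat, by omega⟩
    have hlen : M ≤ (PySem.List.sorted prices (fun x => x) false).length := by
      rw [PySem.List.length_sorted]
      exact_mod_cast hpre
    have hmono : ∀ p q : Nat, p ≤ q →
        q < (PySem.List.sorted prices (fun x => x) false).length →
        (PySem.List.sorted prices (fun x => x) false).getD p 0 ≤
          (PySem.List.sorted prices (fun x => x) false).getD q 0 := by
      intro p q hpq hq
      rw [List.getD_eq_getElem _ _ (by omega), List.getD_eq_getElem _ _ hq]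
      exact PySem.List.sorted_id_getElem_mono prices hpq hq
    rw [pvA_eq, pvB_eq, pvMap_eq, pvCountA_eq _ _ hlen hmono, pvCountB_eq]
  · -- n < 0: both programs return (0, [])
    have hA : maximize_cheap_spheres n prices = (0, []) := by
      simp only [maximize_cheap_spheres]
      have h1 : PySem.List.pyRange 1 n 2 = [] := by
        rw [PySem.List.pyRange_of_pos _ _ (by norm_num : (0:Int) < 2), if_neg (by omega)]
        rfl
      have h2 : PySem.List.pyRange 0 n 2 = [] := by
        rw [PySem.List.pyRange_of_pos _ _ (by norm_num : (0:Int) < 2), if_neg (by omega)]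
        rfl
      have h3 : PySem.List.pyRange 1 (n - 1) 1 = [] := PySem.List.pyRange_one_eq_nil (by omega)
      have h4 : PySem.List.pyRepeat [(0:Int)] n = [] := by
        rw [PySem.List.pyRepeat_singleton]
        have h : n.toNat = 0 := by omega
        rw [h]; rfl
      rw [h1, h2, h3, h4]
      simp [PySem.List.enumerate_nil]
    have hB : maximize_cheap_spheres_alt n prices = (0, []) := by
      simp only [maximize_cheap_spheres_alt]
      have hr : PySem.List.pyRange 0 n 1 = [] := PySem.List.pyRange_one_eq_nil (by omega)
      rw [hr]
      rfl
    rw [hA, hB]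

-- ===== VERDICT (by name: the statement is the Claim_ definition above) =====
theorem maximize_cheap_spheres_spec : Claim_equal_maximize_cheap_spheres := by
  intro n prices _ hpre
  show maximize_cheap_spheres n prices = maximize_cheap_spheres_alt n prices
  exact pvMain n prices hpre
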